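-- pv_equiv track=rewrite | github.com/songjh2125/KSC2025 | scripts/make_labels.py | rule_fallback
-- ===== SOURCE A (Python) =====
-- def rule_fallback(dialogue: str):
--     utts = [u.strip() for u in dialogue.split('\n') if u.strip()]
--     boundaries = [0]*len(utts)
--     seg_summaries = [""]*len(utts)
--     cur = []
--     for i,u in enumerate(utts):
--         prev = utts[i-1][:3] if i>0 else None
--         cursp = u[:3]
--         trigger = (i>0 and cursp!=prev and len(cur)>=4)
--         if trigger:
--             boundaries[i] = 1
--             seg_summaries[i] = (cur[0] + (" … " + cur[-1] if len(cur)>1 else ""))[:100]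
--             cur = []
--         cur.append(u)
--     if cur:
--         seg_summaries[-1] = (cur[0] + (" … " + cur[-1] if len(cur)>1 else ""))[:100]
--     return boundaries, seg_summaries
-- ===== SOURCE B (Python) =====
-- # Two-pass reimplementation: first partition utterances into segments (start index + contents)
-- # with the same greedy predicate, then place each summary at the following segment's start
-- # (and the last segment's summary at the final index). No running `cur` list is maintained.
--
-- def summarize(seg):
--     return (seg[0] + (" … " + seg[-1] if len(seg) > 1 else ""))[:100]
--
-- def rule_fallback(dialogue: str):
--     utts = [u.strip() for u in dialogue.split('\n') if u.strip()]
--     n = len(utts)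
--     if n == 0:
--         return [], []
--     segs = []
--     start = 0
--     for i in range(1, n):
--         if utts[i][:3] != utts[i-1][:3] and i - start >= 4:
--             segs.append((start, utts[start:i]))
--             start = i
--     segs.append((start, utts[start:]))
--     boundaries = [0] * n
--     summaries = [""] * n
--     for seg, nxt in zip(segs, segs[1:]):
--         boundaries[nxt[0]] = 1
--         summaries[nxt[0]] = summarize(seg[1])
--     summaries[-1] = summarize(segs[-1][1])
--     return boundaries, summaries
-- ===== Notes on version B (the rewrite author's own statement) =====
-- stated objective: alternative
-- what changed: A's single pass that carries a running `cur` list and writes summaries at trigger time is replaced by a two-pass decomposition: first partition the utterances into segments (start index + contents) with the same greedy predicate, then place each segment's summary at the next segment's start index (last segment's at the final index).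
import Mathlib
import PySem

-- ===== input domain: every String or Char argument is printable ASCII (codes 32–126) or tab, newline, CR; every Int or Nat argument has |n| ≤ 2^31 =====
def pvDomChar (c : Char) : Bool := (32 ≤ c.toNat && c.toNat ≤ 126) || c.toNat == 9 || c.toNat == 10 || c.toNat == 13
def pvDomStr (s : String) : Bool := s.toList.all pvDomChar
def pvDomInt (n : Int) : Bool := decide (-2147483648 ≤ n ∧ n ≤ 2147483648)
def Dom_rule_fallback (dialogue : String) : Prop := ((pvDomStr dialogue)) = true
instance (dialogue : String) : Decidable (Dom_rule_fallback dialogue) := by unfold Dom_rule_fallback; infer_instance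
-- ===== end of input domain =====

-- B replaces A's single pass with a running `cur` list by a two-pass decomposition
-- (partition into segments, then place each segment's summary); same cost, clearer structure.

-- ===== PORT A =====
-- utts = [u.strip() for u in dialogue.split('\n') if u.strip()]   (shared by both Pythons verbatim)
def pvUtts (dialogue : String) : List String :=
  (((PySem.Str.split? dialogue "\n").getD []).filter
      (fun u => PySem.Str.strip u != "")).map PySem.Str.strip

-- (cur[0] + (" … " + cur[-1] if len(cur)>1 else ""))[:100] — the summary expression both
-- Pythons contain; every call site passes a nonempty cur, so the pyGetD defaults never fire.
def pySumm (cur : List String) : String :=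
  PySem.Str.slice
    (PySem.List.pyGetD cur 0 "" ++
      (if 1 < cur.length then " … " ++ PySem.List.pyGetD cur (-1) "" else ""))
    none (some 100)

-- the body of A's `for i,u in enumerate(utts)` loop; state = (boundaries, seg_summaries, cur);
-- utts[i-1] is read only when i>0, hence always in range.
def pvStepA (utts : List String) (st : List Int × List String × List String)
    (iu : Int × String) : List Int × List String × List String :=
  let prev : Option String :=
    if 0 < iu.1 then
      some (PySem.Str.slice (PySem.List.pyGetD utts (iu.1 - 1) "") none (some 3))
    else none
  let cursp := PySem.Str.slice iu.2 none (some 3)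
  if 0 < iu.1 ∧ some cursp ≠ prev ∧ 4 ≤ st.2.2.length then
    (PySem.List.pySetD st.1 iu.1 1,
     PySem.List.pySetD st.2.1 iu.1 (pySumm st.2.2),
     [iu.2])
  else (st.1, st.2.1, st.2.2 ++ [iu.2])

def rule_fallback (dialogue : String) : List Int × List String :=
  let utts := pvUtts dialogue
  let st := (PySem.List.enumerate utts).foldl (pvStepA utts)
      (List.replicate utts.length 0, List.replicate utts.length "", [])
  if st.2.2 ≠ [] then
    (st.1, PySem.List.pySetD st.2.1 (-1) (pySumm st.2.2))
  else (st.1, st.2.1)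

-- ===== PORT B =====
-- body of B's first loop (`for i in range(1, n)`): state = (segs, start)
def pvStepB (utts : List String) (st : List (Int × List String) × Int) (i : Int) :
    List (Int × List String) × Int :=
  if PySem.Str.slice (PySem.List.pyGetD utts i "") none (some 3) ≠
       PySem.Str.slice (PySem.List.pyGetD utts (i - 1) "") none (some 3) ∧
     4 ≤ i - st.2 then
    (st.1 ++ [(st.2, PySem.List.slice utts (some st.2) (some i))], i)
  else st

-- body of B's second loop (`for seg, nxt in zip(segs, segs[1:])`)
def pvPlace (bs : List Int × List String) (pr : (Int × List String) × (Int × List String)) :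
    List Int × List String :=
  (PySem.List.pySetD bs.1 pr.2.1 1, PySem.List.pySetD bs.2 pr.2.1 (pySumm pr.1.2))

def rule_fallback_alt (dialogue : String) : List Int × List String :=
  let utts := pvUtts dialogue
  let n := utts.length
  if n = 0 then ([], []) else
    let sb := (PySem.List.pyRange 1 (n : Int) 1).foldl (pvStepB utts) ([], 0)
    let segs := sb.1 ++ [(sb.2, PySem.List.slice utts (some sb.2) none)]
    let out := (segs.zip segs.tail).foldl pvPlace
        (List.replicate n 0, List.replicate n "")
    (out.1, PySem.List.pySetD out.2 (-1) (pySumm (PySem.List.pyGetD segs (-1) (0, [])).2))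

-- ===== PRECONDITION & SPEC =====
def Spec_rule_fallback (dialogue : String) (out : List Int × List String) : Prop := out = rule_fallback_alt dialogue
instance (dialogue : String) (out : List Int × List String) : Decidable (Spec_rule_fallback dialogue out) := by unfold Spec_rule_fallback; infer_instance

-- ===== CLAIM (what is proved, stated in full; the proofs are below) =====
def Claim_equal_rule_fallback : Prop := ∀ (dialogue : String), Dom_rule_fallback dialogue → Spec_rule_fallback dialogue (rule_fallback dialogue)

-- ===== LEMMAS AND PROOFS =====

-- A's loop after the first k iterations
def pvFoldA (utts : List String) (k : Nat) : List Int × List String × List String :=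
  ((PySem.List.enumerate utts).take k).foldl (pvStepA utts)
    (List.replicate utts.length 0, List.replicate utts.length "", [])

-- B's first loop over indices 1..k-1
def pvFoldB (utts : List String) (k : Nat) : List (Int × List String) × Int :=
  (PySem.List.pyRange 1 (k : Int) 1).foldl (pvStepB utts) ([], 0)

-- B's second loop, keeping only the start index of each "next" segment
def pvApply (utts : List String) (segs : List (Int × List String)) (start : Int) :
    List Int × List String :=
  (segs.zip ((segs.map (fun p => p.1) ++ [start]).tail)).foldl
    (fun bs pr => (PySem.List.pySetD bs.1 pr.2 1, PySem.List.pySetD bs.2 pr.2 (pySumm pr.1.2)))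
    (List.replicate utts.length 0, List.replicate utts.length "")

lemma pvEnumGet {α : Type} (xs : List α) (s : Int) (k : Nat) :
    (PySem.List.enumerate xs s)[k]? = xs[k]?.map (fun x => (s + (k : Int), x)) := by
  induction xs generalizing s k with
  | nil => simp [PySem.List.enumerate]
  | cons a t ih =>
    cases k with
    | zero => simp [PySem.List.enumerate_cons]
    | succ k =>
      simp only [PySem.List.enumerate_cons, List.getElem?_cons_succ, ih]
      cases t[k]? <;> simp
      ring

lemma pvSliceSucc {α : Type} (xs : List α) (m k : Nat) (hm : m ≤ k) (hk : k < xs.length) :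
    PySem.List.slice xs (some (m : Int)) (some ((k : Int) + 1)) =
      PySem.List.slice xs (some (m : Int)) (some (k : Int)) ++ [xs[k]] := by
  rw [show ((k : Int) + 1) = ((k + 1 : Nat) : Int) by push_cast; ring]
  rw [PySem.List.slice_natCast, PySem.List.slice_natCast]
  rw [show k + 1 - m = (k - m) + 1 by omega, List.take_add_one]
  rw [List.getElem?_drop, show m + (k - m) = k by omega]
  simp [hk]

lemma pvSliceLen {α : Type} (xs : List α) (m k : Nat) (hk : k ≤ xs.length) :
    (PySem.List.slice xs (some (m : Int)) (some (k : Int))).length = k - m := by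
  rw [PySem.List.slice_natCast]
  simp; omega

lemma pvSliceSingleton {α : Type} (xs : List α) (k : Nat) (hk : k < xs.length) :
    PySem.List.slice xs (some (k : Int)) (some ((k : Int) + 1)) = [xs[k]] := by
  rw [pvSliceSucc xs k k le_rfl hk, PySem.List.slice_natCast]
  simp

lemma pvZipTrunc {α β : Type} (l : List α) (x : α) (T : List β) (h : T.length ≤ l.length) :
    (l ++ [x]).zip T = l.zip T := by
  induction l generalizing T with
  | nil => cases T <;> simp_all
  | cons a t ih =>
    cases T with
    | nil => simp
    | cons b T => simp_all [ih T]

lemma pvTailMap (segs : List (Int × List String)) (x : Int × List String) :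
    ((segs ++ [x]).tail).map (fun p => p.1) = (segs.map (fun p => p.1) ++ [x.1]).tail := by
  cases segs <;> simp

-- B's second loop over full pairs equals the start-only fold pvApply
lemma pvBridge (utts : List String) (segs : List (Int × List String)) (x : Int × List String) :
    ((segs ++ [x]).zip ((segs ++ [x]).tail)).foldl pvPlace
        (List.replicate utts.length (0 : Int), List.replicate utts.length "") =
      pvApply utts segs x.1 := by
  unfold pvApply
  rw [← pvTailMap, ← pvZipTrunc segs x _ (by simp), List.zip_map_right, List.foldl_map]
  rfl

lemma pvFoldA_succ (utts : List String) (k : Nat) (hk : k < utts.length) :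
    pvFoldA utts (k + 1) = pvStepA utts (pvFoldA utts k) ((k : Int), utts[k]) := by
  unfold pvFoldA
  rw [List.take_add_one, pvEnumGet]
  simp [List.getElem?_eq_getElem hk]

lemma pvFoldB_succ (utts : List String) (k : Nat) (h1 : 1 ≤ k) :
    pvFoldB utts (k + 1) = pvStepB utts (pvFoldB utts k) (k : Int) := by
  unfold pvFoldB
  rw [show ((k + 1 : Nat) : Int) = (k : Int) + 1 by push_cast; ring,
      PySem.List.pyRange_one_succ_right (by exact_mod_cast h1), List.foldl_append]
  simp only [List.foldl_cons, List.foldl_nil]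

-- the loop invariant: after k = j+1 iterations A's state is B's segmentation state, rendered
lemma pvInv (utts : List String) :
    ∀ (j : Nat), j + 1 ≤ utts.length →
      0 ≤ (pvFoldB utts (j + 1)).2 ∧ (pvFoldB utts (j + 1)).2.toNat < j + 1 ∧
      pvFoldA utts (j + 1) =
        ((pvApply utts (pvFoldB utts (j + 1)).1 (pvFoldB utts (j + 1)).2).1,
         (pvApply utts (pvFoldB utts (j + 1)).1 (pvFoldB utts (j + 1)).2).2,
         PySem.List.slice utts (some (pvFoldB utts (j + 1)).2) (some ((j + 1 : Nat) : Int))) := by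
  intro j
  induction j with
  | zero =>
    intro hn
    have hB : pvFoldB utts 1 = ([], 0) := by
      unfold pvFoldB
      rw [PySem.List.pyRange_one_eq_nil (by norm_num)]
      rfl
    have h0 : 0 < utts.length := hn
    have hA : pvFoldA utts 1 =
        (List.replicate utts.length (0 : Int), List.replicate utts.length "", [utts[0]]) := by
      have := pvFoldA_succ utts 0 h0
      rw [show pvFoldA utts 0 =
        (List.replicate utts.length (0 : Int), List.replicate utts.length "", []) from rfl] at this
      rw [this]
      simp [pvStepA]
    refine ⟨by simp [hB], by simp [hB], ?_⟩
    rw [hA, hB]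
    simp only [pvApply, List.zip_nil_left, List.foldl_nil, Prod.mk.injEq, true_and]
    have h1 := pvSliceSingleton utts 0 h0
    norm_num at h1 ⊢
    exact h1.symm
  | succ j ih =>
    intro hn
    have hk : j + 1 < utts.length := hn
    obtain ⟨hpos, hlt, hfold⟩ := ih (by omega)
    set sb := pvFoldB utts (j + 1) with hsb
    set segs := sb.1
    set start := sb.2
    -- shared trigger condition
    have hcur : (PySem.List.slice utts (some start) (some ((j + 1 : Nat) : Int))).length
        = (j + 1) - start.toNat := by
      rw [show start = ((start.toNat : Nat) : Int) by omega]
      exact pvSliceLen utts start.toNat (j + 1) (by omega)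
    rw [pvFoldA_succ utts (j + 1) hk, pvFoldB_succ utts (j + 1) (by omega), hfold]
    rw [show pvStepB utts sb ((j + 1 : Nat) : Int) = pvStepB utts (segs, start) ((j + 1 : Nat) : Int) from rfl]
    have hu : PySem.List.pyGetD utts ((j + 1 : Nat) : Int) "" = utts[j + 1] := by
      rw [PySem.List.pyGetD_natCast]
      exact List.getD_eq_getElem utts "" hk
    by_cases hs : PySem.Str.slice (PySem.List.pyGetD utts ((j + 1 : Nat) : Int) "") none (some 3) ≠
        PySem.Str.slice (PySem.List.pyGetD utts (((j + 1 : Nat) : Int) - 1) "") none (some 3)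
    · by_cases hn4 : 4 ≤ ((j + 1 : Nat) : Int) - start
      · -- trigger fires in both
        have hA : pvStepA utts
            ((pvApply utts segs start).1, (pvApply utts segs start).2,
              PySem.List.slice utts (some start) (some ((j + 1 : Nat) : Int)))
            (((j + 1 : Nat) : Int), utts[j + 1]) =
            (PySem.List.pySetD (pvApply utts segs start).1 ((j + 1 : Nat) : Int) 1,
             PySem.List.pySetD (pvApply utts segs start).2 ((j + 1 : Nat) : Int)
               (pySumm (PySem.List.slice utts (some start) (some ((j + 1 : Nat) : Int)))),
             [utts[j + 1]]) := by
          unfold pvStepA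
          dsimp only
          rw [if_pos]
          refine ⟨by positivity, ?_, by rw [hcur]; omega⟩
          rw [if_pos (by positivity)]
          intro hcontra
          apply hs
          rw [hu]
          exact Option.some_injective _ hcontra
        have hB : pvStepB utts (segs, start) ((j + 1 : Nat) : Int) =
            (segs ++ [(start, PySem.List.slice utts (some start) (some ((j + 1 : Nat) : Int)))],
             ((j + 1 : Nat) : Int)) := by
          unfold pvStepB
          dsimp only
          rw [if_pos ⟨hs, hn4⟩]
        rw [hA, hB]
        refine ⟨by positivity, by simp, ?_⟩
        -- pvApply over the extended segment list takes one extra update step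
        have happ : pvApply utts
            (segs ++ [(start, PySem.List.slice utts (some start) (some ((j + 1 : Nat) : Int)))])
            ((j + 1 : Nat) : Int) =
            (PySem.List.pySetD (pvApply utts segs start).1 ((j + 1 : Nat) : Int) 1,
             PySem.List.pySetD (pvApply utts segs start).2 ((j + 1 : Nat) : Int)
               (pySumm (PySem.List.slice utts (some start) (some ((j + 1 : Nat) : Int))))) := by
          unfold pvApply
          rw [List.map_append, List.tail_append_of_ne_nil (by simp), List.map_singleton]
          rw [List.zip_append (by simp), List.foldl_append]
          simp only [List.zip_cons_cons, List.zip_nil_right, List.foldl_cons, List.foldl_nil]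
        dsimp only
        rw [happ]
        simp only [Prod.mk.injEq, true_and]
        have h1 := pvSliceSingleton utts (j + 1) hk
        rw [show (((j + 1 + 1 : Nat)) : Int) = ((j + 1 : Nat) : Int) + 1 by push_cast; ring]
        exact h1.symm
      · -- length condition fails in both: no trigger
        have hA : pvStepA utts
            ((pvApply utts segs start).1, (pvApply utts segs start).2,
              PySem.List.slice utts (some start) (some ((j + 1 : Nat) : Int)))
            (((j + 1 : Nat) : Int), utts[j + 1]) =
            ((pvApply utts segs start).1, (pvApply utts segs start).2,
              PySem.List.slice utts (some start) (some ((j + 1 : Nat) : Int)) ++ [utts[j + 1]]) := by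
          unfold pvStepA
          dsimp only
          rw [if_neg]
          rintro ⟨-, -, hlen⟩
          rw [hcur] at hlen
          omega
        have hB : pvStepB utts (segs, start) ((j + 1 : Nat) : Int) = (segs, start) := by
          unfold pvStepB
          dsimp only
          rw [if_neg (by rintro ⟨-, h4⟩; exact hn4 h4)]
        rw [hA, hB]
        refine ⟨hpos, by omega, ?_⟩
        simp only [Prod.mk.injEq, true_and]
        rw [show (((j + 1 + 1 : Nat)) : Int) = ((j + 1 : Nat) : Int) + 1 by push_cast; ring]
        rw [show start = ((start.toNat : Nat) : Int) by omega]
        rw [pvSliceSucc utts start.toNat (j + 1) (by omega) hk]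
    · -- first-3-chars equal: no trigger in either
      rw [not_ne_iff] at hs
      have hA : pvStepA utts
          ((pvApply utts segs start).1, (pvApply utts segs start).2,
            PySem.List.slice utts (some start) (some ((j + 1 : Nat) : Int)))
          (((j + 1 : Nat) : Int), utts[j + 1]) =
          ((pvApply utts segs start).1, (pvApply utts segs start).2,
            PySem.List.slice utts (some start) (some ((j + 1 : Nat) : Int)) ++ [utts[j + 1]]) := by
        unfold pvStepA
        dsimp only
        rw [if_neg]
        rintro ⟨-, hne, -⟩
        rw [if_pos (by positivity)] at hne
        apply hne
        rw [hu] at hs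
        exact congrArg _ hs
      have hB : pvStepB utts (segs, start) ((j + 1 : Nat) : Int) = (segs, start) := by
        unfold pvStepB
        dsimp only
        rw [if_neg (by rintro ⟨hne, -⟩; exact hne hs)]
      rw [hA, hB]
      refine ⟨hpos, by omega, ?_⟩
      simp only [Prod.mk.injEq, true_and]
      rw [show (((j + 1 + 1 : Nat)) : Int) = ((j + 1 : Nat) : Int) + 1 by push_cast; ring]
      rw [show start = ((start.toNat : Nat) : Int) by omega]
      rw [pvSliceSucc utts start.toNat (j + 1) (by omega) hk]

-- ===== VERDICT (by name: the statement is the Claim_ definition above) =====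
set_option maxHeartbeats 1000000 in
theorem rule_fallback_spec : Claim_equal_rule_fallback := by
  intro dialogue _
  unfold Spec_rule_fallback rule_fallback rule_fallback_alt
  dsimp only
  by_cases h0 : (pvUtts dialogue).length = 0
  · have hnil : pvUtts dialogue = [] := List.length_eq_zero_iff.mp h0
    rw [hnil]
    norm_num [PySem.List.enumerate]
  · set utts := pvUtts dialogue with hutts
    set sb := pvFoldB utts utts.length with hsb
    obtain ⟨hpos, hlt, hfold⟩ := pvInv utts (utts.length - 1) (by omega)
    rw [show utts.length - 1 + 1 = utts.length from by omega] at hpos hlt hfold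
    rw [← hsb] at hpos hlt hfold
    have hEnum : (PySem.List.enumerate utts).foldl (pvStepA utts)
        (List.replicate utts.length 0, List.replicate utts.length "", []) =
        pvFoldA utts utts.length := by
      unfold pvFoldA
      rw [List.take_of_length_le (le_of_eq (PySem.List.length_enumerate utts 0))]
    have hsb' : (PySem.List.pyRange 1 ((utts.length : Nat) : Int) 1).foldl (pvStepB utts) ([], 0) = sb :=
      hsb.symm
    have hlen : (PySem.List.slice utts (some sb.2) (some ((utts.length : Nat) : Int))).length
        = utts.length - sb.2.toNat := by
      rw [show sb.2 = ((sb.2.toNat : Nat) : Int) by omega]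
      exact pvSliceLen utts sb.2.toNat utts.length le_rfl
    have hne : PySem.List.slice utts (some sb.2) (some ((utts.length : Nat) : Int)) ≠ [] :=
      List.ne_nil_of_length_pos (by rw [hlen]; omega)
    have hsl : PySem.List.slice utts (some sb.2) none =
        PySem.List.slice utts (some sb.2) (some ((utts.length : Nat) : Int)) := by
      rw [PySem.List.slice_from utts hpos, show sb.2 = ((sb.2.toNat : Nat) : Int) by omega,
        PySem.List.slice_natCast]
      exact (List.take_of_length_le (by simp; omega)).symm
    rw [hEnum]
    rw [hfold]
    rw [if_neg h0]
    rw [hsb']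
    dsimp only
    rw [if_pos hne]
    rw [hsl]
    rw [pvBridge utts sb.1 (sb.2, PySem.List.slice utts (some sb.2) (some ((utts.length : Nat) : Int)))]
    rw [PySem.List.pyGetD_neg_one_append_singleton]
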